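-- pv_equiv track=rewrite | github.com/HecRodCode/kairo-integrative-project-turing | docs/test-aprendizaje/calcular_resultados.py | calcular_puntajes
-- ===== SOURCE A (Python) =====
-- from collections import defaultdict
-- from typing import Dict, List, Tuple
--
-- VARK_TAGS = {"V", "A", "R", "K"}
--
-- ILS_TAGS = {"ACT", "REF", "SNS", "INT", "VIS", "VRB", "SEQ", "GLO"}
--
-- KOLB_TAGS = {"CE", "RO", "AC", "AE"}
--
-- def calcular_puntajes(respuestas: List[dict], datos: dict) -> Dict[str, Dict[str, int]]:
--     """
--     Recibe una lista de respuestas [{questionId, optionId, score}]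
--     donde score es un tag único (V, A, REF, CE, etc.).
--     Retorna puntajes acumulados por modelo y dimensión.
--     """
--     puntajes = {
--         "vark": defaultdict(int),
--         "ils": defaultdict(int),
--         "kolb": defaultdict(int),
--     }
--
--     for resp in respuestas:
--         tag = resp.get("score", "")
--         if not tag:
--             continue
--
--         if tag in VARK_TAGS:
--             puntajes["vark"][tag] += 1
--         elif tag in ILS_TAGS:
--             puntajes["ils"][tag] += 1
--         elif tag in KOLB_TAGS:
--             puntajes["kolb"][tag] += 1
--
--     return {k: dict(v) for k, v in puntajes.items()}
-- ===== SOURCE B (Python) =====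
-- VARK_TAGS = {"V", "A", "R", "K"}
-- ILS_TAGS = {"ACT", "REF", "SNS", "INT", "VIS", "VRB", "SEQ", "GLO"}
-- KOLB_TAGS = {"CE", "RO", "AC", "AE"}
--
-- def calcular_puntajes(respuestas, datos):
--     # No incremental counter dict at all: extract the tag stream once, then for
--     # each model bucket collect its distinct keys in first-appearance order and
--     # look each key's total up with list.count.
--     tags = [r.get("score", "") for r in respuestas]
--
--     def bucket(valid):
--         seen = []
--         for t in tags:
--             if t and t in valid and t not in seen:
--                 seen.append(t)
--         return {t: tags.count(t) for t in seen}
--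
--     return {"vark": bucket(VARK_TAGS),
--             "ils": bucket(ILS_TAGS),
--             "kolb": bucket(KOLB_TAGS)}
-- ===== Notes on version B (the rewrite author's own statement) =====
-- stated objective: alternative
-- what changed: A maintains three mutable count dicts and classifies each response inside one loop with an if/elif chain; B keeps no running counts at all: it extracts the tag stream once, collects each bucket's distinct keys in first-appearance order, and computes every count afterwards with list.count, trading O(n) incremental bookkeeping for O(n*d) repeated scans.
import Mathlib
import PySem

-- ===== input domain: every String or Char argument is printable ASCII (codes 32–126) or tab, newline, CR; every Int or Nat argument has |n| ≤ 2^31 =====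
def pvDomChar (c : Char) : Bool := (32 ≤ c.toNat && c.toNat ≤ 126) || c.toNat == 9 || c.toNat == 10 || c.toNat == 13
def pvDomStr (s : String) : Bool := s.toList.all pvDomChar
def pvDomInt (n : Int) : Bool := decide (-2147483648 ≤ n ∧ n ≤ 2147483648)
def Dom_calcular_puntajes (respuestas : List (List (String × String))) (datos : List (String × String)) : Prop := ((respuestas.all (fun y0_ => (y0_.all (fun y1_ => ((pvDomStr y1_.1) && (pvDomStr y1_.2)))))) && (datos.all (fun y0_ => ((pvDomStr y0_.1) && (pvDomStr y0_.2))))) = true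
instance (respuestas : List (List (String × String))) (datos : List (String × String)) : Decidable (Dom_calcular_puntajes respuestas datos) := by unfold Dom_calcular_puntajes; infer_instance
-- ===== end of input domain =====

-- B keeps no running count dicts: it lists each bucket's distinct keys in first-appearance
-- order and computes every count afterwards with list.count (objective: alternative).


-- module constants (shared by both Pythons)
def pvVARK : List String := ["V", "A", "R", "K"]
def pvILS : List String := ["ACT", "REF", "SNS", "INT", "VIS", "VRB", "SEQ", "GLO"]
def pvKOLB : List String := ["CE", "RO", "AC", "AE"]

-- resp.get("score", "") — first-match lookup in the association list
def pvTagOf (resp : List (String × String)) : String :=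
  (PySem.Dict.mk resp).getD "score" ""

-- ===== PORT A =====
-- loop body: skip empty tag, then the if/elif/elif chain incrementing one defaultdict
def pvStepA (st : PySem.Dict String Int × PySem.Dict String Int × PySem.Dict String Int)
    (resp : List (String × String)) :
    PySem.Dict String Int × PySem.Dict String Int × PySem.Dict String Int :=
  let tag := pvTagOf resp
  if tag = "" then st
  else if pvVARK.contains tag then (st.1.modify tag 0 (· + 1), st.2.1, st.2.2)
  else if pvILS.contains tag then (st.1, st.2.1.modify tag 0 (· + 1), st.2.2)
  else if pvKOLB.contains tag then (st.1, st.2.1, st.2.2.modify tag 0 (· + 1))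
  else st

def calcular_puntajes (respuestas : List (List (String × String))) (datos : List (String × String)) : List (String × List (String × Int)) :=
  let st := respuestas.foldl pvStepA (PySem.Dict.empty, PySem.Dict.empty, PySem.Dict.empty)
  [("vark", st.1.items), ("ils", st.2.1.items), ("kolb", st.2.2.items)]

-- ===== PORT B =====
-- bucket(valid): collect distinct keys of the bucket in first-appearance order
-- ('t not in seen: seen.append(t)' is PySem.Set.add), then the dict comprehension
-- {t: tags.count(t) for t in seen} — keys are distinct, so its items are this map.
def pvBucket (tags : List String) (valid : List String) : List (String × Int) :=
  let seen := tags.foldl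
    (fun acc t => if t ≠ "" && valid.contains t then PySem.Set.add acc t else acc)
    PySem.Set.empty
  seen.map (fun t => (t, (tags.count t : Int)))

def calcular_puntajes_alt (respuestas : List (List (String × String))) (datos : List (String × String)) : List (String × List (String × Int)) :=
  let tags := respuestas.map (fun r => pvTagOf r)
  [("vark", pvBucket tags pvVARK),
   ("ils",  pvBucket tags pvILS),
   ("kolb", pvBucket tags pvKOLB)]

-- ===== PRECONDITION & SPEC =====
def Spec_calcular_puntajes (respuestas : List (List (String × String))) (datos : List (String × String)) (out : List (String × List (String × Int))) : Prop := out = calcular_puntajes_alt respuestas datos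
instance (respuestas : List (List (String × String))) (datos : List (String × String)) (out : List (String × List (String × Int))) : Decidable (Spec_calcular_puntajes respuestas datos out) := by unfold Spec_calcular_puntajes; infer_instance

-- ===== CLAIM (what is proved, stated in full; the proofs are below) =====
def Claim_equal_calcular_puntajes : Prop := ∀ (respuestas : List (List (String × String))) (datos : List (String × String)), Dom_calcular_puntajes respuestas datos → Spec_calcular_puntajes respuestas datos (calcular_puntajes respuestas datos)

-- ===== LEMMAS AND PROOFS =====

-- the three tag sets are pairwise disjoint
theorem pv_vark_not_ils {t : String} (h : t ∈ pvVARK) : t ∉ pvILS := by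
  simp [pvVARK] at h
  rcases h with rfl | rfl | rfl | rfl <;> decide

theorem pv_vark_not_kolb {t : String} (h : t ∈ pvVARK) : t ∉ pvKOLB := by
  simp [pvVARK] at h
  rcases h with rfl | rfl | rfl | rfl <;> decide

theorem pv_ils_not_kolb {t : String} (h : t ∈ pvILS) : t ∉ pvKOLB := by
  simp [pvILS] at h
  rcases h with rfl | rfl | rfl | rfl | rfl | rfl | rfl | rfl <;> decide

-- A's loop splits into three independent counting folds over the filtered tag streams
theorem pv_loop_split (rs : List (List (String × String)))
    (v i k : PySem.Dict String Int) :
    rs.foldl pvStepA (v, i, k) =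
      ( (((rs.map (fun r => pvTagOf r)).filter (fun tag => tag ≠ "")).filter
          (fun t => pvVARK.contains t)).foldl (fun d x => d.modify x 0 (· + 1)) v,
        (((rs.map (fun r => pvTagOf r)).filter (fun tag => tag ≠ "")).filter
          (fun t => pvILS.contains t)).foldl (fun d x => d.modify x 0 (· + 1)) i,
        (((rs.map (fun r => pvTagOf r)).filter (fun tag => tag ≠ "")).filter
          (fun t => pvKOLB.contains t)).foldl (fun d x => d.modify x 0 (· + 1)) k ) := by
  induction rs generalizing v i k with
  | nil => simp
  | cons r rs ih =>
    by_cases h0 : pvTagOf r = ""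
    · simp [pvStepA, h0, ih]
    · by_cases hV : pvTagOf r ∈ pvVARK
      · simp [pvStepA, h0, hV, pv_vark_not_ils hV, pv_vark_not_kolb hV, ih]
      · by_cases hI : pvTagOf r ∈ pvILS
        · simp [pvStepA, h0, hV, hI, pv_ils_not_kolb hI, ih]
        · by_cases hK : pvTagOf r ∈ pvKOLB
          · simp [pvStepA, h0, hV, hI, hK, ih]
          · simp [pvStepA, h0, hV, hI, hK, ih]

-- a conditional Set.add fold is Set.update with the filtered stream
theorem pv_fold_add_filter (p : String → Bool) (xs : List String) (s : PySem.Set String) :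
    xs.foldl (fun acc t => if p t then PySem.Set.add acc t else acc) s =
      PySem.Set.update s (xs.filter p) := by
  induction xs generalizing s with
  | nil => rfl
  | cons x xs ih =>
    by_cases hx : p x = true
    · simp [hx, ih, PySem.Set.update]
    · simp [hx, ih, PySem.Set.update]

-- a bucket of B equals Counter(filtered stream).items, where the filter combines
-- the non-empty test and bucket membership
theorem pv_bucket_eq_counter (tags : List String) (valid : List String) :
    pvBucket tags valid =
      (PySem.Dict.counter
        ((tags.filter (fun t => t ≠ "")).filter (fun t => valid.contains t))).items := by
  unfold pvBucket
  rw [pv_fold_add_filter, PySem.Dict.items_counter, List.filter_filter]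
  have hset : PySem.Set.update PySem.Set.empty
      (tags.filter (fun t => t ≠ "" && valid.contains t)) =
      PySem.Set.ofList (tags.filter (fun t => valid.contains t && (t ≠ ""))) := by
    rw [PySem.Set.ofList_eq_foldl]
    unfold PySem.Set.update
    congr 1
    apply List.filter_congr
    intro a _
    exact Bool.and_comm _ _
  rw [hset]
  apply List.map_congr_left
  intro t ht
  have hmem : t ∈ List.filter (fun t => valid.contains t && decide (t ≠ "")) tags :=
    by simpa [PySem.Set.mem_ofList] using ht
  have hp := (List.mem_filter.mp hmem).2
  simp only [Bool.and_eq_true] at hp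
  have h1 : List.count t (List.filter (fun a => valid.contains a && decide (a ≠ "")) tags)
      = List.count t tags := List.count_filter (by simp only [Bool.and_eq_true]; exact ⟨hp.1, hp.2⟩)
  rw [h1]

-- ===== VERDICT (by name: the statement is the Claim_ definition above) =====
theorem calcular_puntajes_spec : Claim_equal_calcular_puntajes := by
  intro respuestas datos _
  show _ = _
  unfold calcular_puntajes calcular_puntajes_alt
  rw [pv_loop_split]
  simp only [← PySem.Dict.counter_eq_foldl, pv_bucket_eq_counter]
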